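-- pv_equiv track=rewrite | github.com/jay-ponce/pgen | src/gen.py | is_readable
-- ===== SOURCE A (Python) =====
-- def is_readable(username, min_letters=4, max_non_letters=2):
--     # Rule 1: Starts and ends with a letter
--     if not username[0].isalpha() or not username[-1].isalpha():
--         return False
--
--     # Rule 2 & 3: Count letters and non-letters
--     letters = sum(c.isalpha() for c in username)
--     non_letters = len(username) - letters
--
--     if letters < min_letters or non_letters > max_non_letters:
--         return False
--
--     # Rule 4: Avoid repeated special characters
--     specials = "!@#$%^&*()_-+=<>?/|\\~`"
--     for i in range(1, len(username)):
--         if username[i] in specials and username[i] == username[i-1]: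
--             return False
--
--     return True
-- ===== SOURCE B (Python) =====
-- def is_readable(username, min_letters=4, max_non_letters=2):
--     # Rule 1: starts and ends with a letter (kept verbatim; raises on "")
--     if not username[0].isalpha() or not username[-1].isalpha():
--         return False
--
--     # Rules 2-4 in one pass: count letters and reject adjacent repeated specials
--     specials = "!@#$%^&*()_-+=<>?/|\\~`"
--     letters = 0
--     prev = None
--     for c in username:
--         if c.isalpha():
--             letters += 1
--         elif c in specials and c == prev:
--             return False
--         prev = c
--
--     return letters >= min_letters and len(username) - letters <= max_non_letters
-- ===== Notes on version B (the rewrite author's own statement) =====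
-- stated objective: simpler
-- what changed: Replaced A's three separate passes (sum() letter count, length subtraction, then an index-based scan for adjacent repeated specials) with one single pass over the characters that counts letters while tracking the previous character, doing the count checks once at the end.
import Mathlib
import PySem

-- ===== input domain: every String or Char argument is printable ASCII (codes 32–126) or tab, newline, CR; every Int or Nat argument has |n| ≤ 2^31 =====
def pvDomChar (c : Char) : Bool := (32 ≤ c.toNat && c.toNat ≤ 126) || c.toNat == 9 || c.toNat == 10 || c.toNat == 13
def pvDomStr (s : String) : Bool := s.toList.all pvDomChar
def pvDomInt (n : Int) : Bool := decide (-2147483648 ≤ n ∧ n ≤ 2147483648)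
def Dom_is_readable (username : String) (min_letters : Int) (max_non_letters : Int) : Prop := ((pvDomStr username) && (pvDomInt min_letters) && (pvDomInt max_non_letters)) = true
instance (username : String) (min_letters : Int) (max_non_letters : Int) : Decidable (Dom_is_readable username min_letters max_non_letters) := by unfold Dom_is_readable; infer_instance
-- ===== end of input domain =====

-- B merges A's three passes (letter count, length subtraction, index scan for repeated
-- specials) into one pass tracking the previous character: simpler, same O(n) cost.
-- Python `username[i] in specials` with a single char is ported exactly as list membership.

-- ===== PORT A =====
def pvSpecials : List Char := ['!','@','#','$','%','^','&','*','(',')','_','-','+','=','<','>','?','/','|','\\','~','`']  -- the chars of A's `specials` string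

def is_readable (username : String) (min_letters : Int) (max_non_letters : Int) : Bool :=
  let cs := username.toList
  match PySem.List.pyGet? cs 0, PySem.List.pyGet? cs (-1) with
  | some c0, some cn =>
    if !(PySem.Chars.isalpha c0) || !(PySem.Chars.isalpha cn) then false
    else
      let letters : Int := (cs.map (fun c => if PySem.Chars.isalpha c then (1 : Int) else 0)).sum
      let non_letters : Int := (cs.length : Int) - letters
      if letters < min_letters || non_letters > max_non_letters then false
      else
        -- for i in range(1, len(username)): early `return False` folded as a sticky flag
        let bad := (PySem.List.pyRange 1 (cs.length : Int) 1).foldl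
          (fun b i => b || (pvSpecials.contains (PySem.List.pyGetD cs i ' ') &&
                            (PySem.List.pyGetD cs i ' ' == PySem.List.pyGetD cs (i - 1) ' '))) false
        if bad then false else true
  | _, _ => false   -- unreachable under Pre_ (empty string raises IndexError)

-- ===== PORT B =====
def pvSpecialsB : List Char := "!@#$%^&*()_-+=<>?/|\\~`".toList  -- Source B's own `specials` string

-- single pass of Source B: returns none on an adjacent repeated special, else the letter count
def pvAltLoop : List Char → Int → Option Char → Option Int
  | [], letters, _ => some letters
  | c :: rest, letters, prev =>
    if PySem.Chars.isalpha c then pvAltLoop rest (letters + 1) (some c)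
    else if pvSpecialsB.contains c && (some c == prev) then none
    else pvAltLoop rest letters (some c)

def is_readable_alt (username : String) (min_letters : Int) (max_non_letters : Int) : Bool :=
  let cs := username.toList
  match PySem.List.pyGet? cs 0 with
  | none => false   -- empty string raises in Source B too
  | some c0 =>
    match PySem.List.pyGet? cs (-1) with
    | none => false
    | some cn =>
      if !(PySem.Chars.isalpha c0) || !(PySem.Chars.isalpha cn) then false
      else
        match pvAltLoop cs 0 none with
        | none => false
        | some letters =>
          decide (min_letters ≤ letters) && decide ((cs.length : Int) - letters ≤ max_non_letters)

-- ===== PRECONDITION & SPEC =====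
-- Pre_ excludes only the empty string, on which both A and B raise IndexError at username[0].
def Pre_is_readable (username : String) (min_letters : Int) (max_non_letters : Int) : Prop :=
  username.toList ≠ []
instance (username : String) (min_letters : Int) (max_non_letters : Int) : Decidable (Pre_is_readable username min_letters max_non_letters) := by unfold Pre_is_readable; infer_instance

def pvWitness_is_readable : String × Int × Int := ("ab!cd", 4, 2)

def Spec_is_readable (username : String) (min_letters : Int) (max_non_letters : Int) (out : Bool) : Prop := out = is_readable_alt username min_letters max_non_letters
instance (username : String) (min_letters : Int) (max_non_letters : Int) (out : Bool) : Decidable (Spec_is_readable username min_letters max_non_letters out) := by unfold Spec_is_readable; infer_instance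

-- ===== CLAIM (what is proved, stated in full; the proofs are below) =====
def Claim_equal_is_readable : Prop := ∀ (username : String) (min_letters : Int) (max_non_letters : Int), Dom_is_readable username min_letters max_non_letters → Pre_is_readable username min_letters max_non_letters → Spec_is_readable username min_letters max_non_letters (is_readable username min_letters max_non_letters)

-- ===== LEMMAS AND PROOFS =====

-- adjacent-repeated-special test as a structural recursion over (prev, rest)
def pvAdj : Char → List Char → Bool
  | _, [] => false
  | p, c :: rest => (pvSpecials.contains c && (c == p)) || pvAdj c rest

theorem pvSpecials_not_alpha : ∀ c ∈ pvSpecials, PySem.Chars.isalpha c = false := by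
  intro c hc; fin_cases hc <;> rfl

theorem pvContains_false {c : Char} (ha : PySem.Chars.isalpha c = true) :
    pvSpecials.contains c = false := by
  cases h : pvSpecials.contains c
  · rfl
  · have hm : c ∈ pvSpecials := by simpa using h
    have := pvSpecials_not_alpha c hm
    rw [ha] at this; exact absurd this (by simp)

theorem pvAltLoop_spec (l : List Char) : ∀ (letters : Int) (p : Char),
    pvAltLoop l letters (some p) =
      if pvAdj p l then none else some (letters + (l.countP PySem.Chars.isalpha : Int)) := by
  induction l with
  | nil => intro letters p; simp [pvAltLoop, pvAdj]
  | cons c rest ih =>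
    intro letters p
    have hbeq : ((some c : Option Char) == some p) = (c == p) := rfl
    by_cases ha : PySem.Chars.isalpha c = true
    · have hc : pvSpecialsB.contains c = false := pvContains_false ha
      rw [show pvAltLoop (c :: rest) letters (some p) = pvAltLoop rest (letters + 1) (some c) by
        simp [pvAltLoop, ha]]
      rw [ih]
      rw [show pvAdj p (c :: rest) = ((pvSpecialsB.contains c && (c == p)) || pvAdj c rest) from rfl,
        hc, Bool.false_and, Bool.false_or]
      split
      · rfl
      · congr 1
        have : (c :: rest).countP PySem.Chars.isalpha = rest.countP PySem.Chars.isalpha + 1 := by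
          simp [List.countP_cons, ha]
        rw [this]; push_cast; ring
    · rw [show pvAltLoop (c :: rest) letters (some p)
          = (if pvSpecialsB.contains c && (c == p) then none
             else pvAltLoop rest letters (some c)) by
        simp [pvAltLoop, ha, hbeq]]
      rw [show pvAdj p (c :: rest) = ((pvSpecialsB.contains c && (c == p)) || pvAdj c rest) from rfl]
      have hcnt : (c :: rest).countP PySem.Chars.isalpha = rest.countP PySem.Chars.isalpha := by
        simp [List.countP_cons, ha]
      cases hs : (pvSpecialsB.contains c && (c == p))
      · simp only [Bool.false_eq_true, if_false, Bool.false_or, ih, hcnt]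
      · simp

theorem pv_or_foldl (l : List Int) (f : Int → Bool) : ∀ b : Bool,
    l.foldl (fun acc i => acc || f i) b = (b || l.any f) := by
  induction l with
  | nil => simp
  | cons x t ih => intro b; simp [List.foldl_cons, ih, Bool.or_assoc]

theorem pv_idx_any (l : List Char) : ∀ p : Char,
    ((List.range l.length).any fun k =>
        pvSpecials.contains ((p :: l).getD (k + 1) ' ') &&
        ((p :: l).getD (k + 1) ' ' == (p :: l).getD k ' ')) = pvAdj p l := by
  induction l with
  | nil => intro p; simp [pvAdj]
  | cons c rest ih =>
    intro p
    have ihc := ih c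
    simp only [List.length_cons, List.range_succ_eq_map, List.any_cons, List.any_map,
      Function.comp_def, List.getD_cons_succ, List.getD_cons_zero, Nat.zero_add] at ihc ⊢
    rw [pvAdj, ← ihc]

-- A's index loop over range(1, n) equals the structural pvAdj scan
theorem pvA_bad_eq (c0 : Char) (rest : List Char) :
    ((PySem.List.pyRange 1 ((c0 :: rest).length : Int) 1).foldl
      (fun b i => b || (pvSpecials.contains (PySem.List.pyGetD (c0 :: rest) i ' ') &&
                        (PySem.List.pyGetD (c0 :: rest) i ' ' == PySem.List.pyGetD (c0 :: rest) (i - 1) ' '))) false)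
    = pvAdj c0 rest := by
  rw [pv_or_foldl, Bool.false_or, PySem.List.pyRange_one]
  rw [List.any_map]
  have hlen : (((c0 :: rest).length : Int) - 1).toNat = rest.length := by
    simp [List.length_cons]
  rw [hlen]
  rw [← pv_idx_any rest c0]
  congr 1
  funext k
  have e1 : (1 : Int) + (k : Int) = ((k + 1 : Nat) : Int) := by push_cast; ring
  have e2 : (1 : Int) + (k : Int) - 1 = ((k : Nat) : Int) := by push_cast; ring
  have e3 : ((k + 1 : Nat) : Int) - 1 = ((k : Nat) : Int) := by push_cast; ring
  simp only [Function.comp_apply, e1, e2, e3, PySem.List.pyGetD_natCast]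

theorem pv_letters_eq (cs : List Char) :
    (cs.map (fun c => if PySem.Chars.isalpha c then (1 : Int) else 0)).sum
      = (cs.countP PySem.Chars.isalpha : Int) := by
  induction cs with
  | nil => simp
  | cons c t ih => by_cases h : PySem.Chars.isalpha c = true <;>
      simp [List.countP_cons, h, ih] <;> push_cast <;> ring

-- ===== VERDICT (by name: the statement is the Claim_ definition above) =====
theorem is_readable_spec : Claim_equal_is_readable := by
  intro username min_letters max_non_letters _ hpre
  unfold Spec_is_readable is_readable is_readable_alt
  obtain ⟨c0, rest, hcs⟩ : ∃ c0 rest, username.toList = c0 :: rest := by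
    cases h : username.toList with
    | nil => exact absurd h hpre
    | cons a t => exact ⟨a, t, rfl⟩
  simp only [hcs]
  rw [PySem.List.pyGet?_zero_cons, PySem.List.pyGet?_neg_one]
  cases hl : (c0 :: rest).getLast? with
  | none => simp at hl
  | some cn =>
    simp only
    by_cases hg : (!(PySem.Chars.isalpha c0) || !(PySem.Chars.isalpha cn)) = true
    · simp [hg]
    · simp only [hg, Bool.false_eq_true, if_false]
      rw [pvA_bad_eq, pv_letters_eq]
      have hcount : (c0 :: rest).countP PySem.Chars.isalpha
          = 1 + rest.countP PySem.Chars.isalpha := by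
        have ha : PySem.Chars.isalpha c0 = true := by
          revert hg; cases PySem.Chars.isalpha c0 <;> simp
        simp [List.countP_cons, ha, Nat.add_comm]
      have hc0 : pvSpecials.contains c0 = false := by
        by_contra h
        have hm : c0 ∈ pvSpecials := by
          revert h; cases hh : pvSpecials.contains c0 <;> simp_all [List.contains_iff_mem]
        have ha : PySem.Chars.isalpha c0 = true := by
          revert hg; cases PySem.Chars.isalpha c0 <;> simp
        have := pvSpecials_not_alpha c0 hm; simp [ha] at this
      -- B's first iteration handles c0 (a letter), then scans rest with prev = c0
      have hfirst : pvAltLoop (c0 :: rest) 0 none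
          = if pvAdj c0 rest then none
            else some (((c0 :: rest).countP PySem.Chars.isalpha : Int)) := by
        have ha : PySem.Chars.isalpha c0 = true := by
          revert hg; cases PySem.Chars.isalpha c0 <;> simp
        rw [show pvAltLoop (c0 :: rest) 0 none = pvAltLoop rest 1 (some c0) by
          simp [pvAltLoop, ha]]
        rw [pvAltLoop_spec, hcount]
        split <;> simp <;> push_cast <;> ring
      rw [hfirst]
      cases hadj : pvAdj c0 rest
      · simp only [Bool.false_eq_true, if_false]
        push_cast [List.length_cons]
        by_cases h1 : ((c0 :: rest).countP PySem.Chars.isalpha : Int) < min_letters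
        · rw [decide_eq_true h1]
          simp only [Bool.true_or, if_true]
          rw [decide_eq_false (show ¬ min_letters ≤ ((c0 :: rest).countP PySem.Chars.isalpha : Int) by omega), Bool.false_and]
        · by_cases h2 : (rest.length : Int) + 1 - ((c0 :: rest).countP PySem.Chars.isalpha : Int) > max_non_letters
          · rw [decide_eq_true h2]
            simp only [Bool.or_true, if_true]
            rw [decide_eq_false (show ¬ (rest.length : Int) + 1 - ((c0 :: rest).countP PySem.Chars.isalpha : Int) ≤ max_non_letters by omega), Bool.and_false]
          · rw [decide_eq_false h1, decide_eq_false h2]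
            simp only [Bool.or_self, Bool.false_eq_true, if_false]
            rw [decide_eq_true (show min_letters ≤ ((c0 :: rest).countP PySem.Chars.isalpha : Int) by omega),
                decide_eq_true (show (rest.length : Int) + 1 - ((c0 :: rest).countP PySem.Chars.isalpha : Int) ≤ max_non_letters by omega), Bool.and_self]
      · simp only [if_true]
        split <;> rfl
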